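-- pv_equiv track=rewrite | github.com/markodraisma/python_3_daags_uitwerkingen | opgave13.py | dubbelen
-- ===== SOURCE A (Python) =====
-- def dubbelen(l_namen):
--     l_namen = l_namen[:]
--     l_dubbelen = []
--     for idx in range(1,len(l_namen)):
--         naam = l_namen[idx]
--         if idx > l_namen.index(naam):
--             l_dubbelen.append(idx)
--     return tuple(l_dubbelen)
-- ===== SOURCE B (Python) =====
-- def dubbelen(l_namen):
--     groups = {}
--     for i, naam in enumerate(l_namen):
--         groups.setdefault(naam, []).append(i)
--     res = [i for idxs in groups.values() for i in idxs[1:]]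
--     res.sort()
--     return tuple(res)
-- ===== Notes on version B (the rewrite author's own statement) =====
-- stated objective: faster
-- what changed: Replaces A's per-index linear .index scan with one enumerate pass that groups indices by value in a dict, then collects every non-first index of each group and sorts them.
import Mathlib
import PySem

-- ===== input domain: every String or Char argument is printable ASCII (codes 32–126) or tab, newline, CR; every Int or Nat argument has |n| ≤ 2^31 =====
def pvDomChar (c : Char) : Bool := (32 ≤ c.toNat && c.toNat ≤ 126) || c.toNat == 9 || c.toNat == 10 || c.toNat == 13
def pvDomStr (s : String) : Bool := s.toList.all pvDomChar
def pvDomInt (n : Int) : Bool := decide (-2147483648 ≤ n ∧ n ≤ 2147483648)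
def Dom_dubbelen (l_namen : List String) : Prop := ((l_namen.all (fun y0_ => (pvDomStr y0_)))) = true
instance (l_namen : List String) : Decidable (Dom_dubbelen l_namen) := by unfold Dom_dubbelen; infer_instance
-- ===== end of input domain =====

-- B builds a value→indices table in one enumerate pass (groups.setdefault(naam, []).append(i), i.e.
-- groups[naam] = groups.get(naam, []) + [i], ported as Dict.modify), collects each group's non-first
-- indices and sorts them, instead of A's per-index `.index` scan (alternative decomposition).

-- ===== PORT A =====
def dubbelen (l_namen : List String) : List Int :=
  (PySem.List.pyRange 1 (l_namen.length : Int) 1).foldl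
    (fun l_dubbelen idx =>
      let naam := PySem.List.pyGetD l_namen idx ""   -- idx ∈ [1, len): always in range
      match PySem.List.index? l_namen naam with
      | some j => if (j : Int) < idx then l_dubbelen ++ [idx] else l_dubbelen
      | none => l_dubbelen)                          -- unreachable: naam is an element of l_namen
    []

-- ===== PORT B =====
def dubbelen_alt (l_namen : List String) : List Int :=
  let groups := (PySem.List.enumerate l_namen 0).foldl
      (fun d p => PySem.Dict.modify d p.2 ([] : List Int) (· ++ [p.1])) PySem.Dict.empty
  let res := groups.values.flatMap (fun idxs => idxs.drop 1)   -- idxs[1:] : drop 1 (indices are nonneg)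
  PySem.List.sorted res (fun x => x) false

-- ===== PRECONDITION & SPEC =====
def Spec_dubbelen (l_namen : List String) (out : List Int) : Prop := out = dubbelen_alt l_namen
instance (l_namen : List String) (out : List Int) : Decidable (Spec_dubbelen l_namen out) := by unfold Spec_dubbelen; infer_instance

-- ===== CLAIM (what is proved, stated in full; the proofs are below) =====
def Claim_equal_dubbelen : Prop := ∀ (l_namen : List String), Dom_dubbelen l_namen → Spec_dubbelen l_namen (dubbelen l_namen)

-- ===== LEMMAS AND PROOFS =====

-- A's filter predicate: index of l[idx] is strictly below idx
def pvA (l : List String) (idx : Int) : Bool :=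
  match PySem.List.index? l (PySem.List.pyGetD l idx "") with
  | some j => decide ((j : Int) < idx)
  | none => false

def pvAList (l : List String) : List Int :=
  (PySem.List.pyRange 1 (l.length : Int) 1).filter (pvA l)

-- B's group of indices for a value
def pvIdxs (l : List String) (v : String) : List Int :=
  ((PySem.List.enumerate l 0).filter (fun p => p.2 == v)).map (·.1)

def pvGather (l : List String) : List Int :=
  (PySem.Set.ofList l).flatMap (fun v => (pvIdxs l v).drop 1)

theorem pvMatchIf (o : Option Nat) (acc : List Int) (x : Int) :
    (match o with
      | some j => if (j : Int) < x then acc ++ [x] else acc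
      | none => acc)
    = if (match o with
           | some j => decide ((j : Int) < x)
           | none => false) then acc ++ [x] else acc := by
  cases o with
  | none => rfl
  | some j => by_cases h : (j : Int) < x <;> simp [h]

theorem dubbelen_eq_pvAList (l : List String) : dubbelen l = pvAList l := by
  unfold dubbelen pvAList
  refine (PySem.List.foldl_congr_mem _ _
    (fun acc idx => if pvA l idx then acc ++ [idx] else acc) _ ?_).trans ?_
  · intro acc x _
    exact pvMatchIf (PySem.List.index? l (PySem.List.pyGetD l x "")) acc x
  · exact (PySem.List.foldl_append_if_eq_filter _ _ _).trans (by simp)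

theorem pvGroups_getD (l : List (Int × String)) (d : PySem.Dict String (List Int)) (v : String) :
    (l.foldl (fun d p => PySem.Dict.modify d p.2 ([] : List Int) (· ++ [p.1])) d).getD v []
      = d.getD v [] ++ (l.filter (fun p => p.2 == v)).map (·.1) := by
  induction l generalizing d with
  | nil => simp
  | cons a t ih =>
      simp only [List.foldl_cons, ih, List.filter_cons]
      by_cases h : a.2 = v
      · simp [h]
      · have hb : (a.2 == v) = false := by simp [h]
        simp [hb, PySem.Dict.getD_modify, Ne.symm h]

theorem pvFlatMap_map_drop (s : List String) (f g : String → List Int)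
    (h : ∀ v ∈ s, f v = g v) :
    ((s.map f).flatMap (List.drop 1)) = s.flatMap (fun v => (g v).drop 1) := by
  induction s with
  | nil => simp
  | cons a t ih =>
      simp only [List.map_cons, List.flatMap_cons]
      rw [h a (List.mem_cons_self), ih (fun v hv => h v (List.mem_cons_of_mem _ hv))]

theorem dubbelen_alt_eq_sorted_gather (l : List String) :
    dubbelen_alt l = PySem.List.sorted (pvGather l) (fun x => x) false := by
  unfold dubbelen_alt pvGather
  dsimp only
  have hnd : ((PySem.List.enumerate l 0).foldl
      (fun d p => PySem.Dict.modify d p.2 ([] : List Int) (· ++ [p.1])) PySem.Dict.empty).keys.Nodup :=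
    PySem.Dict.nodup_keys_foldl_modify_key _ _ _ _ _ PySem.Dict.nodup_keys_empty
  rw [PySem.Dict.values_eq_map_keys _ hnd ([] : List Int)]
  rw [PySem.Dict.keys_foldl_modify_key]
  rw [PySem.List.map_snd_enumerate]
  rw [show (PySem.Dict.empty : PySem.Dict String (List Int)).keys = ([] : List String) from PySem.Dict.keys_empty]
  rw [PySem.Set.update_nil_left]
  congr 1
  apply pvFlatMap_map_drop
  intro v _
  rw [pvGroups_getD]
  simp [pvIdxs, PySem.Dict.getD_empty]

theorem pvIdxs_eq_nil_iff (l : List String) (x : String) : pvIdxs l x = [] ↔ x ∉ l := by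
  unfold pvIdxs
  rw [List.map_eq_nil_iff, List.filter_eq_nil_iff]
  constructor
  · intro h hx
    rw [← PySem.List.map_snd_enumerate l 0] at hx
    obtain ⟨p, hp, hps⟩ := List.mem_map.1 hx
    exact h p hp (by simp [hps])
  · intro h p hp hpv
    apply h
    rw [← PySem.List.map_snd_enumerate l 0]
    exact List.mem_map.2 ⟨p, hp, by simpa using hpv⟩

theorem pvFlatMap_append_perm {α β : Type} (s : List α) (f g : α → List β) [DecidableEq β] :
    (s.flatMap fun v => f v ++ g v).Perm (s.flatMap f ++ s.flatMap g) := by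
  induction s with
  | nil => simp
  | cons a t ih =>
      simp only [List.flatMap_cons]
      apply List.perm_iff_count.2
      intro b
      have hc := ih.count_eq b
      simp only [List.count_append] at hc ⊢
      omega

theorem pvFlatMap_ite_single {α β : Type} [DecidableEq α] (s : List α) (x : α) (c : List β)
    (hnd : s.Nodup) (hx : x ∈ s) :
    (s.flatMap fun v => if v = x then c else []) = c := by
  induction s with
  | nil => simp at hx
  | cons a t ih =>
      simp only [List.flatMap_cons]
      by_cases h : a = x
      · subst h
        have hnot : a ∉ t := (List.nodup_cons.1 hnd).1
        have hz : (t.flatMap fun v => if v = a then c else []) = [] := by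
          apply List.flatMap_eq_nil_iff.2
          intro v hv
          have : v ≠ a := fun he => hnot (he ▸ hv)
          simp [this]
        simp [hz]
      · have hxt : x ∈ t := by
          rcases List.mem_cons.1 hx with h' | h'
          · exact absurd h'.symm h
          · exact h'
        simp [h, ih (List.nodup_cons.1 hnd).2 hxt]

theorem pvEnum_append (l : List String) (x : String) :
    PySem.List.enumerate (l ++ [x]) 0 = PySem.List.enumerate l 0 ++ [((l.length : Int), x)] := by
  simp [PySem.List.enumerate_append, PySem.List.enumerate_cons, PySem.List.enumerate_nil]

theorem pvIdxs_append (l : List String) (x v : String) :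
    pvIdxs (l ++ [x]) v = pvIdxs l v ++ (if x == v then [((l.length : Int))] else []) := by
  unfold pvIdxs
  rw [pvEnum_append, List.filter_append, List.map_append]
  by_cases h : x = v <;> simp [h]

theorem pvA_append_last (l : List String) (x : String) :
    pvA (l ++ [x]) (l.length : Int) = decide (x ∈ l) := by
  unfold pvA
  rw [PySem.List.pyGetD_natCast]
  have hget : (l ++ [x]).getD l.length "" = x := by simp
  rw [hget]
  by_cases hx : x ∈ l
  · rw [PySem.List.index?_append_of_mem [x] hx]
    have hs : (PySem.List.index? l x).isSome := (PySem.List.index?_isSome_iff l x).2 hx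
    obtain ⟨k, hk⟩ := Option.isSome_iff_exists.1 hs
    have hklt : k < l.length := (PySem.List.getElem_of_index?_eq_some hk).1
    rw [hk]
    simp [hx]
    exact_mod_cast hklt
  · rw [PySem.List.index?_append_singleton_self l x hx]
    simp [hx]

theorem pvAList_append (l : List String) (x : String) :
    pvAList (l ++ [x]) = pvAList l ++ (if x ∈ l then [((l.length : Int))] else []) := by
  unfold pvAList
  rcases eq_or_ne l [] with rfl | hne
  · simp
  · have hn : (1 : Int) ≤ (l.length : Int) := by
      have := List.length_pos_of_ne_nil hne
      exact_mod_cast this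
    have hlen : (((l ++ [x]).length : Nat) : Int) = (l.length : Int) + 1 := by
      simp [List.length_append]
    rw [hlen, PySem.List.pyRange_one_succ_right hn, List.filter_append]
    congr 1
    · apply List.filter_congr
      intro idx hidx
      obtain ⟨h1, h2⟩ := PySem.List.mem_pyRange_one.1 hidx
      have h0 : 0 ≤ idx := le_trans (by norm_num) h1
      obtain ⟨k, rfl⟩ : ∃ k : Nat, idx = (k : Int) := ⟨idx.toNat, (Int.toNat_of_nonneg h0).symm⟩
      have hk : k < l.length := by exact_mod_cast h2
      unfold pvA
      rw [PySem.List.pyGetD_natCast, PySem.List.pyGetD_natCast]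
      rw [List.getD_append _ _ _ _ hk]
      have hmem : l.getD k "" ∈ l := by
        rw [List.getD_eq_getElem _ _ hk]
        exact List.getElem_mem hk
      rw [PySem.List.index?_append_of_mem [x] hmem]
    · rw [List.filter_singleton, pvA_append_last]
      by_cases hx : x ∈ l <;> simp [hx]

theorem pvGather_append_perm (l : List String) (x : String) :
    (pvGather (l ++ [x])).Perm (pvGather l ++ (if x ∈ l then [((l.length : Int))] else [])) := by
  unfold pvGather
  rw [PySem.Set.ofList_append_singleton]
  by_cases hx : x ∈ l
  · have hmem : x ∈ PySem.Set.ofList l := by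
      rw [PySem.Set.mem_ofList]
      exact hx
    rw [PySem.Set.add_of_mem hmem]
    have hcong : ∀ v ∈ PySem.Set.ofList l, (pvIdxs (l ++ [x]) v).drop 1
        = (pvIdxs l v).drop 1 ++ (if v = x then [((l.length : Int))] else []) := by
      intro v hv
      rw [pvIdxs_append]
      by_cases hvx : v = x
      · subst hvx
        have hne : pvIdxs l v ≠ [] := fun h => ((pvIdxs_eq_nil_iff l v).1 h) hx
        have hlen1 : 1 ≤ (pvIdxs l v).length := List.length_pos_of_ne_nil hne
        rw [if_pos (beq_self_eq_true v ▸ rfl)]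
        rw [List.drop_append_of_le_length hlen1]
        simp
      · have hb : (x == v) = false := by
          simp only [beq_eq_false_iff_ne, ne_eq]
          exact fun he => hvx he.symm
        simp [hb, hvx]
    rw [List.flatMap_congr hcong]
    refine (pvFlatMap_append_perm _ _ _).trans ?_
    rw [pvFlatMap_ite_single (PySem.Set.ofList l) x _ (PySem.Set.nodup_ofList l) hmem]
    simp [hx]
  · have hnm : x ∉ PySem.Set.ofList l := by
      rw [PySem.Set.mem_ofList]
      exact hx
    rw [PySem.Set.add_of_not_mem hnm, List.flatMap_append]
    have hcong : ∀ v ∈ PySem.Set.ofList l, (pvIdxs (l ++ [x]) v).drop 1 = (pvIdxs l v).drop 1 := by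
      intro v hv
      have hvl : v ∈ l := by
        rw [PySem.Set.mem_ofList] at hv
        exact hv
      have hb : (x == v) = false := by
        simp only [beq_eq_false_iff_ne, ne_eq]
        exact fun he => hx (he ▸ hvl)
      rw [pvIdxs_append]
      simp [hb]
    rw [List.flatMap_congr hcong]
    have h2 : ([x].flatMap fun v => (pvIdxs (l ++ [x]) v).drop 1) = [] := by
      simp only [List.flatMap_cons, List.flatMap_nil, List.append_nil]
      rw [pvIdxs_append, (pvIdxs_eq_nil_iff l x).2 hx]
      simp
    rw [h2]
    simp [hx]

theorem pvMain (l : List String) : (pvGather l).Perm (pvAList l) := by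
  induction l using List.reverseRecOn with
  | nil => decide
  | append_singleton l x ih =>
      rw [pvAList_append]
      exact (pvGather_append_perm l x).trans (ih.append (List.Perm.refl _))

-- ===== VERDICT placeholder =====
-- ===== VERDICT (by name: the statement is the Claim_ definition above) =====
theorem dubbelen_spec : Claim_equal_dubbelen := by
  intro l _
  unfold Spec_dubbelen
  rw [dubbelen_eq_pvAList, dubbelen_alt_eq_sorted_gather]
  exact (PySem.List.sorted_eq_of_perm_of_pairwise_lt (pvGather l) (pvAList l) (fun x => x)
    (pvMain l).symm
    ((PySem.List.pairwise_lt_pyRange_one (a := 1) (b := (l.length : Int))).filter _)).symm
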